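-- pv_equiv track=rewrite | github.com/kkj15dk/axolotl | sample_cond.py | preprocess_masked_sequence
-- ===== SOURCE A (Python) =====
-- from typing import Optional, List, Union
--
-- def preprocess_masked_sequence(
--     masked_sequence: str,
--     add_bos: bool = False,
--     add_eos: bool = False,
-- ) -> tuple[List[int], str, int]:
--     """
--     Preprocess the masked sequence to create a list of input positions and string of the amino tokens to put at these positions.
--     Args:
--         masked_sequence (str): The sequence with masked positions represented by underscores.
--         add_bos (bool): Whether to add a beginning-of-sequence token.
--         add_eos (bool): Whether to add an end-of-sequence token.
--     Returns:
--         tuple: A tuple containing: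
--             - input_locs (List[int]): A list of indices where the sequence is not masked (i.e., where the character is not "_").
--             - input_sequence (str): The sequence with only the non-masked characters.
--             - length (int): The length of the input sequence
--     """
--
--     # preprocess to get the correct input format
--     input_locs = []
--     if add_bos:
--         masked_sequence = '[' + masked_sequence
--     if add_eos:
--         masked_sequence = masked_sequence + ']'
--     length = len(masked_sequence)
--
--     for i, c in enumerate(masked_sequence):
--         if c != "_":
--             input_locs.append(i)
--     input_sequence = "".join([masked_sequence[i] for i in input_locs])
--
--     return input_locs, input_sequence, length
-- ===== SOURCE B (Python) =====
-- def preprocess_masked_sequence(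
--     masked_sequence: str,
--     add_bos: bool = False,
--     add_eos: bool = False,
-- ):
--     if add_bos:
--         masked_sequence = '[' + masked_sequence
--     if add_eos:
--         masked_sequence = masked_sequence + ']'
--     length = len(masked_sequence)
--     # segment view: split on the mask; the kept string is the concatenation of
--     # the segments, and the kept indices are consecutive runs whose offsets are
--     # the cumulative segment lengths (each skipped "_" advances the offset by 1).
--     parts = masked_sequence.split("_")
--     input_sequence = "".join(parts)
--     input_locs = []
--     pos = 0
--     for part in parts:
--         input_locs.extend(range(pos, pos + len(part)))
--         pos += len(part) + 1
--     return input_locs, input_sequence, length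
-- ===== Notes on version B (the rewrite author's own statement) =====
-- stated objective: faster
-- what changed: B works on segments instead of characters: it splits the sequence on the mask character with str.split, joins the segments to obtain the kept string, and reconstructs the index list as consecutive ranges at cumulative segment offsets (C-level split/join and range-extend replace A's per-character Python loop and re-indexing join).
import Mathlib
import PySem

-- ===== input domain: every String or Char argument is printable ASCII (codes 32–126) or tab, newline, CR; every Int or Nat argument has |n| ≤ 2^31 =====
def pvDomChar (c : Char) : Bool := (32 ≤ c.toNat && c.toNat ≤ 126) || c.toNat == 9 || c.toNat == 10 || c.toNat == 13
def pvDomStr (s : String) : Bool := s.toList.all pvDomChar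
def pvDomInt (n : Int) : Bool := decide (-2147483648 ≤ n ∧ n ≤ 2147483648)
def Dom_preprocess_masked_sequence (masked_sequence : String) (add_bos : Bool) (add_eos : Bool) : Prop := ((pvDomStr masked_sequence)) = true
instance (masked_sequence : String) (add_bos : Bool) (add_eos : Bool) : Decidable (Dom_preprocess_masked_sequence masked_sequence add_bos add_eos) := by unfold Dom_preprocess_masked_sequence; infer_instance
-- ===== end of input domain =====

-- B works on segments: split on '_', join the segments for the string, and build the index
-- list as consecutive ranges at cumulative segment offsets, instead of A's per-character
-- index scan followed by re-indexing the sequence through that list (measured faster at large sizes in a timing run).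


-- ===== PORT A =====
def preprocess_masked_sequence (masked_sequence : String) (add_bos : Bool) (add_eos : Bool) : List Int × String × Int :=
  let cs1 := if add_bos then '[' :: masked_sequence.toList else masked_sequence.toList
  let cs := if add_eos then cs1 ++ [']'] else cs1
  let length : Int := PySem.List.len cs
  -- for i, c in enumerate(masked_sequence): if c != "_": input_locs.append(i)
  let input_locs : List Int :=
    (PySem.List.enumerate cs 0).foldl (fun acc p => if p.2 != '_' then acc ++ [p.1] else acc) []
  -- "".join([masked_sequence[i] for i in input_locs])  (indices are always in range here)
  let input_sequence := PySem.Chars.join [] (input_locs.map (fun i => [PySem.List.pyGetD cs i ' ']))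
  (input_locs, String.ofList input_sequence, length)

-- ===== PORT B =====
def preprocess_masked_sequence_alt (masked_sequence : String) (add_bos : Bool) (add_eos : Bool) : List Int × String × Int :=
  let cs1 := if add_bos then '[' :: masked_sequence.toList else masked_sequence.toList
  let cs := if add_eos then cs1 ++ [']'] else cs1
  let length : Int := PySem.List.len cs
  -- parts = masked_sequence.split("_")
  let parts := PySem.Chars.splitOn cs ['_']
  -- input_sequence = "".join(parts)
  let input_sequence := PySem.Chars.join [] parts
  -- pos = 0; for part in parts: input_locs.extend(range(pos, pos+len(part))); pos += len(part)+1
  let st := parts.foldl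
    (fun (st : Int × List Int) part =>
      (st.1 + part.length + 1, st.2 ++ PySem.List.pyRange st.1 (st.1 + part.length) 1))
    (0, [])
  (st.2, String.ofList input_sequence, length)

-- ===== PRECONDITION & SPEC =====
def Spec_preprocess_masked_sequence (masked_sequence : String) (add_bos : Bool) (add_eos : Bool) (out : List Int × String × Int) : Prop := out = preprocess_masked_sequence_alt masked_sequence add_bos add_eos
instance (masked_sequence : String) (add_bos : Bool) (add_eos : Bool) (out : List Int × String × Int) : Decidable (Spec_preprocess_masked_sequence masked_sequence add_bos add_eos out) := by unfold Spec_preprocess_masked_sequence; infer_instance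

-- ===== CLAIM (what is proved, stated in full; the proofs are below) =====
def Claim_equal_preprocess_masked_sequence : Prop := ∀ (masked_sequence : String) (add_bos : Bool) (add_eos : Bool), Dom_preprocess_masked_sequence masked_sequence add_bos add_eos → Spec_preprocess_masked_sequence masked_sequence add_bos add_eos (preprocess_masked_sequence masked_sequence add_bos add_eos)

-- ===== LEMMAS AND PROOFS =====

-- Simple structural model of splitting on the single character '_'.
def splitU : List Char → List (List Char)
  | [] => [[]]
  | c :: rest =>
    if c = '_' then [] :: splitU rest
    else
      match splitU rest with
      | p :: ps => (c :: p) :: ps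
      | [] => [[c]]

theorem splitU_ne_nil (cs : List Char) : splitU cs ≠ [] := by
  cases cs with
  | nil => simp [splitU]
  | cons c rest =>
    simp only [splitU]
    split
    · simp
    · split
      · simp
      · simp

theorem splitOn_go_eq (fuel : Nat) (l cur : List Char) (acc : List (List Char))
    (h : l.length ≤ fuel) :
    PySem.Chars.splitOn.go ['_'] fuel l cur acc
      = acc.reverse ++ (splitU l).modifyHead (cur.reverse ++ ·) := by
  induction fuel generalizing l cur acc with
  | zero =>
    cases l with
    | nil => simp [PySem.Chars.splitOn.go, splitU]
    | cons c t => simp at h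
  | succ n ih =>
    cases l with
    | nil => simp [PySem.Chars.splitOn.go, splitU]
    | cons c t =>
      by_cases hc : c = '_'
      · subst hc
        have hpre : (['_'] : List Char).isPrefixOf ('_' :: t) = true := by
          simp [List.isPrefixOf]
        simp only [PySem.Chars.splitOn.go, hpre, if_pos]
        rw [ih _ _ _ (by simpa using Nat.le_of_succ_le_succ h)]
        simp only [List.length_cons, List.length_nil, List.drop_succ_cons, List.drop_zero]
        have hm : List.modifyHead (fun x => List.reverse ([] : List Char) ++ x) (splitU t)
            = splitU t := by cases splitU t <;> rfl
        rw [hm]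
        simp [splitU]
      · have hpre : (['_'] : List Char).isPrefixOf (c :: t) = false := by
          simp [List.isPrefixOf]; exact fun hx => (hc hx.symm).elim
        simp only [PySem.Chars.splitOn.go]
        rw [if_neg (by simp [hpre]), ih _ _ _ (by simpa using Nat.le_of_succ_le_succ h)]
        simp only [splitU, if_neg hc]
        cases hs : splitU t with
        | nil => exact absurd hs (splitU_ne_nil t)
        | cons p ps => simp

theorem splitOn_eq_splitU (cs : List Char) :
    PySem.Chars.splitOn cs ['_'] = splitU cs := by
  have h := splitOn_go_eq (cs.length + 1) cs [] [] (by omega)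
  rw [PySem.Chars.splitOn, h]
  cases splitU cs <;> simp

-- Joining the segments gives exactly the non-'_' characters, in order.
theorem join_splitU (cs : List Char) :
    PySem.Chars.join [] (splitU cs) = cs.filter (fun c => c != '_') := by
  induction cs with
  | nil => decide
  | cons c rest ih =>
    by_cases hc : c = '_'
    · subst hc
      have : PySem.Chars.join ([] : List Char) ([] :: splitU rest)
          = PySem.Chars.join [] (splitU rest) := by
        cases hs : splitU rest with
        | nil => exact absurd hs (splitU_ne_nil rest)
        | cons p ps => simp [PySem.Chars.join_cons_cons]
      simp [splitU, this, ih]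
    · have hrest := splitU_ne_nil rest
      cases hs : splitU rest with
      | nil => exact absurd hs hrest
      | cons p ps =>
        have hjoin : PySem.Chars.join ([] : List Char) ((c :: p) :: ps)
            = c :: PySem.Chars.join [] (p :: ps) := by
          cases ps with
          | nil => simp [PySem.Chars.join_singleton]
          | cons q qs => simp [PySem.Chars.join_cons_cons]
        simp only [splitU, if_neg hc, hs, hjoin, List.filter_cons]
        rw [← hs, ih]
        simp [hc]

-- The block-wise index ranges of the segments, starting at offset n.
def blockLocs : List (List Char) → Int → List Int
  | [], _ => []
  | p :: ps, n => PySem.List.pyRange n (n + p.length) 1 ++ blockLocs ps (n + p.length + 1)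

theorem foldl_blockLocs (parts : List (List Char)) (n : Int) (l0 : List Int) :
    (parts.foldl
      (fun (st : Int × List Int) part =>
        (st.1 + part.length + 1, st.2 ++ PySem.List.pyRange st.1 (st.1 + part.length) 1))
      (n, l0)).2 = l0 ++ blockLocs parts n := by
  induction parts generalizing n l0 with
  | nil => simp [blockLocs]
  | cons p ps ih => simp [List.foldl_cons, ih, blockLocs]

-- The segment ranges coincide with the non-'_' positions of the enumerate scan.
theorem blockLocs_splitU (cs : List Char) (n : Int) :
    blockLocs (splitU cs) n
      = ((PySem.List.enumerate cs n).filter (fun p => p.2 != '_')).map (·.1) := by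
  induction cs generalizing n with
  | nil => simp [splitU, blockLocs, PySem.List.enumerate, PySem.List.pyRange_one_eq_nil]
  | cons c rest ih =>
    by_cases hc : c = '_'
    · subst hc
      simp [splitU, blockLocs, PySem.List.pyRange_one_eq_nil, PySem.List.enumerate_cons, ih]
    · cases hs : splitU rest with
      | nil => exact absurd hs (splitU_ne_nil rest)
      | cons p ps =>
        have ih' := ih (n + 1)
        rw [hs] at ih'
        have hc' : (c != '_') = true := by simp [hc]
        simp only [splitU, if_neg hc, hs, blockLocs, List.length_cons,
          PySem.List.enumerate_cons, List.filter_cons, hc', if_true, List.map_cons]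
        push_cast
        have hlt : n < n + ((p.length : Int) + 1) := by omega
        rw [PySem.List.pyRange_one_cons hlt, ← ih', blockLocs]
        have e1 : n + ((p.length : Int) + 1) = n + 1 + p.length := by ring
        rw [e1]
        simp

-- A's loop in filter form.
theorem a_locs_eq (cs : List Char) :
    (PySem.List.enumerate cs 0).foldl (fun acc p => if p.2 != '_' then acc ++ [p.1] else acc) []
      = ((PySem.List.enumerate cs 0).filter (fun p => p.2 != '_')).map (·.1) := by
  rw [PySem.List.foldl_append_if, List.nil_append]

-- Re-indexing the sequence through the filtered enumerate positions gives back the filtered characters.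
theorem reindex_eq_filter (cs : List Char) :
    ((((PySem.List.enumerate cs 0).filter (fun p => p.2 != '_')).map (·.1)).map
        (fun i => [PySem.List.pyGetD cs i ' ']))
      = (cs.filter (fun c => c != '_')).map (fun c => [c]) := by
  rw [List.map_map]
  have hmem : ∀ p ∈ (PySem.List.enumerate cs 0).filter (fun p => p.2 != '_'),
      ((fun i => [PySem.List.pyGetD cs i ' ']) ∘ (·.1)) p = (fun p : Int × Char => [p.2]) p := by
    intro p hp
    have hp' := List.mem_of_mem_filter hp
    obtain ⟨k, hk, rfl⟩ := (PySem.List.mem_enumerate_iff cs 0 p).mp hp'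
    simp [PySem.List.pyGetD_natCast, List.getD_eq_getElem?_getD, hk]
  rw [List.map_congr_left hmem]
  calc ((PySem.List.enumerate cs 0).filter (fun p => p.2 != '_')).map (fun p => ([p.2] : List Char))
      = (((PySem.List.enumerate cs 0).filter (fun p => p.2 != '_')).map (·.2)).map (fun c => [c]) := by
        rw [List.map_map]; rfl
    _ = ((((PySem.List.enumerate cs 0).map (·.2)).filter (fun c => c != '_'))).map (fun c => [c]) := by
        rw [List.filter_map]; rfl
    _ = ((cs.filter (fun c => c != '_')).map (fun c => [c])) := by
        rw [PySem.List.map_snd_enumerate]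

-- ===== VERDICT (by name: the statement is the Claim_ definition above) =====
theorem preprocess_masked_sequence_spec : Claim_equal_preprocess_masked_sequence := by
  intro ms add_bos add_eos _
  unfold Spec_preprocess_masked_sequence preprocess_masked_sequence preprocess_masked_sequence_alt
  simp only []
  refine Prod.ext ?_ (Prod.ext ?_ rfl)
  · rw [a_locs_eq, splitOn_eq_splitU, foldl_blockLocs, List.nil_append, blockLocs_splitU]
  · rw [a_locs_eq, splitOn_eq_splitU, reindex_eq_filter, PySem.Chars.join_nil_singletons,
      join_splitU]
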